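-- pv_equiv track=rewrite | github.com/KaiserTvDotCom/work | Obtener coordenadas.py | invertValue
-- ===== SOURCE A (Python) =====
-- def invertValue(val):
--     # 32f0c9c2
--     val = str(val)
--     strList = []
--
--     if len(val) > 0:
--         # 32f0c9c2
--         while len(val) > 0:
--             element = val[len(val)-2:len(val)]
--             val = val[0:len(val)-2]
--             strList.append(element)
--             pass
--         pass
--
--     return ''.join(str(i) for i in strList)
-- ===== SOURCE B (Python) =====
-- def invertValue(val):
--     # Forward pass: peel the leading chunk (1 char if odd length remains, else 2),
--     # then reverse the chunk list and join.
--     t = str(val)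
--     chunks = []
--     while t:
--         k = 1 if len(t) % 2 else 2
--         chunks.append(t[:k])
--         t = t[k:]
--     return ''.join(reversed(chunks))
-- ===== Notes on version B (the rewrite author's own statement) =====
-- stated objective: alternative
-- what changed: A repeatedly slices 2-char chunks off the END of the string in a while loop that mutates the string; B recursively peels the leading (short-if-odd) chunk in a forward pass, then reverses the chunk list and joins.
import Mathlib
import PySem

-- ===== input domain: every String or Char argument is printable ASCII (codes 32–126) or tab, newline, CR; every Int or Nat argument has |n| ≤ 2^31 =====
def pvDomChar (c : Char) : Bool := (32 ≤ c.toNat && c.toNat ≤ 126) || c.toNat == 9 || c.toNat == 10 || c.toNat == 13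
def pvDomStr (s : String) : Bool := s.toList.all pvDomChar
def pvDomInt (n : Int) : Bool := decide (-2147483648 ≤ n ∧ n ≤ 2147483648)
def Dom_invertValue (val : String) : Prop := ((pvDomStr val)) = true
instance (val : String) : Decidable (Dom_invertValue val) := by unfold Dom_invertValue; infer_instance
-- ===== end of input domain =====

-- B collects the 2-char chunks by a forward recursion (short chunk first on odd length)
-- and reverses the list, instead of A's backward end-slicing while loop; objective:
-- alternative decomposition, same cost.

-- ===== PORT A =====
-- helpers needed by loopA's termination proof: what A's two slices compute
theorem sliceFront_eq_take (l : List Char) :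
    PySem.List.slice l (some 0) (some ((l.length : Int) - 2)) = l.take (l.length - 2) := by
  by_cases h : 2 ≤ l.length
  · have h2 : ((l.length : Int) - 2) = ((l.length - 2 : Nat) : Int) := by omega
    rw [h2, PySem.List.slice_zero_start, PySem.List.slice_to_natCast]
  · cases l with
    | nil => norm_num [PySem.List.slice, PySem.List.clampIdx]
    | cons a t =>
      cases t with
      | nil => norm_num [PySem.List.slice, PySem.List.clampIdx]
      | cons b t' => exact absurd (by simp) h

theorem sliceFront_lt (l : List Char) (h : 0 < l.length) :
    (PySem.List.slice l (some 0) (some ((l.length : Int) - 2))).length < l.length := by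
  rw [sliceFront_eq_take]; simp; omega

-- while len(val) > 0: element = val[len-2:len]; val = val[0:len-2]; strList.append(element)
def loopA (l : List Char) : List (List Char) :=
  if h : 0 < l.length then
    PySem.List.slice l (some ((l.length : Int) - 2)) (some (l.length : Int)) ::
      loopA (PySem.List.slice l (some 0) (some ((l.length : Int) - 2)))
  else []
termination_by l.length
decreasing_by exact sliceFront_lt l h

def invertValue (val : String) : String :=
  let strList := loopA val.toList
  String.ofList strList.flatten        -- ''.join(str(i) for i in strList)

-- ===== PORT B =====
-- while t: peel leading chunk of size 1 (odd remaining length) or 2 — as structural recursion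
def chunksB : List Char → List (List Char)
  | [] => []
  | c :: t =>
    let k := if (c :: t).length % 2 = 1 then 1 else 2
    (c :: t).take k :: chunksB ((c :: t).drop k)
termination_by l => l.length
decreasing_by simp only [List.length_drop, List.length_cons]; split <;> omega

def invertValue_alt (val : String) : String :=
  String.ofList ((chunksB val.toList).reverse.flatten)   -- ''.join(reversed(chunks(s)))

-- ===== PRECONDITION & SPEC =====
def Spec_invertValue (val : String) (out : String) : Prop := out = invertValue_alt val
instance (val : String) (out : String) : Decidable (Spec_invertValue val out) := by unfold Spec_invertValue; infer_instance

-- ===== CLAIM (what is proved, stated in full; the proofs are below) =====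
def Claim_equal_invertValue : Prop := ∀ (val : String), Dom_invertValue val → Spec_invertValue val (invertValue val)

-- ===== LEMMAS AND PROOFS =====

theorem sliceBack_eq_drop (l : List Char) (h : l ≠ []) :
    PySem.List.slice l (some ((l.length : Int) - 2)) (some (l.length : Int)) =
      l.drop (l.length - 2) := by
  by_cases h2 : 2 ≤ l.length
  · have ha : ((l.length : Int) - 2) = ((l.length - 2 : Nat) : Int) := by omega
    rw [ha, PySem.List.slice_natCast]
    exact List.take_of_length_le (by simp)
  · cases l with
    | nil => exact absurd rfl h
    | cons a t =>
      cases t with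
      | nil => norm_num [PySem.List.slice, PySem.List.clampIdx]
      | cons b t' => exact absurd (by simp) h2

theorem chunksB_nil : chunksB [] = [] := by rw [chunksB]

theorem chunksB_cons_odd (c : Char) (t : List Char) (h : (c :: t).length % 2 = 1) :
    chunksB (c :: t) = (c :: t).take 1 :: chunksB ((c :: t).drop 1) := by
  have h' : (t.length + 1) % 2 = 1 := by simpa using h
  simp [chunksB, if_pos h']

theorem chunksB_cons_even (c : Char) (t : List Char) (h : ¬ (c :: t).length % 2 = 1) :
    chunksB (c :: t) = (c :: t).take 2 :: chunksB ((c :: t).drop 2) := by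
  have h' : ¬ (t.length + 1) % 2 = 1 := by simpa using h
  simp [chunksB, if_neg h']

theorem chunksB_cons2_even (x y : Char) (r : List Char) (h : (x :: y :: r).length % 2 = 0) :
    chunksB (x :: y :: r) = [x, y] :: chunksB r := by
  rw [chunksB_cons_even x (y :: r) (by omega)]; simp

theorem chunksB_append_even : ∀ (a b : List Char), a.length % 2 = 0 → b.length % 2 = 0 →
    chunksB (a ++ b) = chunksB a ++ chunksB b
  | [], _, _, _ => by simp [chunksB_nil]
  | [x], _, ha, _ => by simp at ha
  | x :: y :: a', b, ha, hb => by
    have ha' : a'.length % 2 = 0 := by simp at ha; omega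
    rw [List.cons_append, List.cons_append,
        chunksB_cons2_even x y (a' ++ b) (by simp; omega),
        chunksB_cons2_even x y a' ha,
        chunksB_append_even a' b ha' hb, List.cons_append]
termination_by a => a.length

theorem chunksB_pair (x y : Char) : chunksB [x, y] = [[x, y]] := by
  rw [chunksB_cons2_even x y [] (by simp), chunksB_nil]

theorem loopA_peel : ∀ (c r : List Char), c ≠ [] → c.length ≤ 2 → r.length % 2 = 0 →
    loopA (c ++ r) = (chunksB r).reverse ++ [c]
  | c, r, hc1, hc2, hr => by
    by_cases hr0 : r = []
    · subst hr0
      rw [List.append_nil, loopA, dif_pos (by cases c <;> simp_all),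
          sliceBack_eq_drop c hc1, sliceFront_eq_take]
      have h0 : c.length - 2 = 0 := by omega
      rw [h0, List.drop_zero, List.take_zero, loopA]
      simp [chunksB_nil]
    · have hlen : 2 ≤ r.length := by
        cases r with
        | nil => exact absurd rfl hr0
        | cons z t => simp at hr ⊢; omega
      have hT : (r.drop (r.length - 2)).length = 2 := by simp; omega
      obtain ⟨x, y, hxy⟩ : ∃ x y, r.drop (r.length - 2) = [x, y] := by
        match h : r.drop (r.length - 2), hT with
        | [x, y], _ => exact ⟨x, y, rfl⟩
      rw [loopA, dif_pos (by simp; omega), sliceBack_eq_drop _ (by simp [hr0]),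
          sliceFront_eq_take]
      have hlc : (c ++ r).length - 2 = c.length + (r.length - 2) := by simp; omega
      have e1 : c.length + (r.length - 2) - c.length = r.length - 2 := by omega
      have h1 : (c ++ r).drop (c.length + (r.length - 2)) = r.drop (r.length - 2) := by
        rw [List.drop_append, e1, List.drop_eq_nil_of_le (by omega), List.nil_append]
      have h2 : (c ++ r).take (c.length + (r.length - 2)) = c ++ r.take (r.length - 2) := by
        rw [List.take_append, e1, List.take_of_length_le (by omega)]
      rw [hlc, h1, h2]
      rw [loopA_peel c (r.take (r.length - 2)) hc1 hc2 (by simp; omega)]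
      conv_rhs => rw [(List.take_append_drop (r.length - 2) r).symm]
      rw [chunksB_append_even _ _ (by simp; omega) (by rw [hT]), hxy, chunksB_pair]
      simp
termination_by _ r => r.length
decreasing_by simp; omega

theorem loopA_eq_reverse_chunksB (l : List Char) : loopA l = (chunksB l).reverse := by
  cases l with
  | nil => rw [loopA]; simp [chunksB_nil]
  | cons c t =>
    by_cases hpar : (c :: t).length % 2 = 1
    · have h := loopA_peel ((c :: t).take 1) ((c :: t).drop 1) (by simp)
        (by simp) (by simp at hpar ⊢; omega)
      rw [List.take_append_drop] at h
      rw [h, chunksB_cons_odd c t hpar]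
      simp
    · have h := loopA_peel ((c :: t).take 2) ((c :: t).drop 2) (by simp)
        (by simp [List.length_take]) (by simp at hpar ⊢; omega)
      rw [List.take_append_drop] at h
      rw [h, chunksB_cons_even c t hpar]
      simp

-- ===== VERDICT (by name: the statement is the Claim_ definition above) =====
theorem invertValue_spec : Claim_equal_invertValue := by
  intro val _
  show invertValue val = invertValue_alt val
  unfold invertValue invertValue_alt
  rw [loopA_eq_reverse_chunksB]
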